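-- pv_equiv track=rewrite | github.com/oyekanmiayo/learning-python | iknowyouknowexercise.py | getUpdatedStatement
-- ===== SOURCE A (Python) =====
-- def getUpdatedStatement(statement):
--
--     # Create a list of all the words that makes up the statment. So "i know you know" will be converted to list ["i", "know", "you", "know"]
--     # statement.lower() converts the string to lowercase. statement.split(" ") converts statement to a list divided by space
--     stmtList = statement.lower().split(" ")
--     # List to save all the indexes in the stmtList where value = "i"
--     iIndexList = []
--     # List to save all the indexes in the stmtList where value = "you"
--     youIndexList = []
--
--     # Using this variable to maintain the value of the index where you find "i" or "you"
--     idx = 0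
--
--     # Iterate over each word in stmtList
--     for string in stmtList:
--         # if current word is "i", save the index in the list that saves all indexes of "i"
--         if string.lower() == "i":
--             iIndexList.append(idx)
--         # if current word is "you", save the index in the list that saves all indexes of "you"
--         elif string.lower() == "you":
--             youIndexList.append(idx)
--         # increment index for each iteration
--         idx += 1
--
--    # Using the list that saves all the indexes of i, replace all i's with you
--     for x in iIndexList:
--         stmtList[x] = "you"
--
--     # Using the list that saves all the indexes of you, replace all you's with i
--     for x in youIndexList:
--         stmtList[x] = "i"
--
--     # After replacing is with yous and yous with is, check if first word on the list is i or you
--     # use " ".join(list) to create a string from all the items in the list separated by space.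
--     # if we instead did ",".join(list), then we create a list of all the items in the list separated by comma
--     if stmtList[0].lower() == "i":
--         #if first word is i, add "you know" to front of the string
--         return "you know " + " ".join(stmtList)
--     else:
--         #if first word is you, add "i know" to front of the string
--         return "i know " + " ".join(stmtList)
-- ===== SOURCE B (Python) =====
-- def getUpdatedStatement(statement):
--     # Single pass: lowercase and split once, swap each word directly, then prepend.
--     words = statement.lower().split(" ")
--     swapped = ['you' if w == 'i' else 'i' if w == 'you' else w for w in words]
--     prefix = 'you know ' if swapped[0] == 'i' else 'i know '
--     return prefix + ' '.join(swapped)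
-- ===== Notes on version B (the rewrite author's own statement) =====
-- stated objective: simpler
-- what changed: B lowercases and splits once and swaps each word in a single direct map, instead of A's building two index lists in one loop and then replaying two in-place replacement loops over the word list.
import Mathlib
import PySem

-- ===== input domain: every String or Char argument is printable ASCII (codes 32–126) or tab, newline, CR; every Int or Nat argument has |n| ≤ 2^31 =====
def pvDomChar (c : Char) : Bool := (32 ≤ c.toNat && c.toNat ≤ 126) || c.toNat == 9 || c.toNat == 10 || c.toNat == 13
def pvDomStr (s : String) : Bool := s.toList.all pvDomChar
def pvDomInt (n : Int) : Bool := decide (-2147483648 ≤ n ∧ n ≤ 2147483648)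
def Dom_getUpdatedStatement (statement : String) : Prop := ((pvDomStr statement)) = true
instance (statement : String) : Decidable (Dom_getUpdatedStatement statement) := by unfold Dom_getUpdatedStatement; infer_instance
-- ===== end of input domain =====

-- B replaces A's two index lists and two replacement loops by one direct map over the words (simpler decomposition, same cost).

-- ===== PORT A =====
-- split(" ") has a non-empty separator, so Str.split? is always `some`: .getD [] is exact.
-- split(" ") never returns an empty list, so stmtList[0] never raises: pyGetD with any default is exact.
def getUpdatedStatement (statement : String) : String :=
  let stmtList := (PySem.Str.split? (PySem.Str.lower statement) " ").getD []
  let acc := stmtList.foldl (fun (acc : List Int × List Int × Int) s =>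
      if PySem.Str.lower s == "i" then (acc.1 ++ [acc.2.2], acc.2.1, acc.2.2 + 1)
      else if PySem.Str.lower s == "you" then (acc.1, acc.2.1 ++ [acc.2.2], acc.2.2 + 1)
      else (acc.1, acc.2.1, acc.2.2 + 1)) ([], [], 0)
  let stmtList := acc.1.foldl (fun l x => PySem.List.pySetD l x "you") stmtList
  let stmtList := acc.2.1.foldl (fun l x => PySem.List.pySetD l x "i") stmtList
  if PySem.Str.lower (PySem.List.pyGetD stmtList 0 "") == "i" then
    "you know " ++ PySem.Str.join " " stmtList
  else
    "i know " ++ PySem.Str.join " " stmtList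

-- ===== PORT B =====
def pvSwapWord (w : String) : String :=
  if w == "i" then "you" else if w == "you" then "i" else w

-- same remarks on split? / pyGetD as in port A
def getUpdatedStatement_alt (statement : String) : String :=
  let words := (PySem.Str.split? (PySem.Str.lower statement) " ").getD []
  let swapped := words.map pvSwapWord
  let pre := if PySem.List.pyGetD swapped 0 "" == "i" then "you know " else "i know "
  pre ++ PySem.Str.join " " swapped

-- ===== PRECONDITION & SPEC =====
def Spec_getUpdatedStatement (statement : String) (out : String) : Prop := out = getUpdatedStatement_alt statement
instance (statement : String) (out : String) : Decidable (Spec_getUpdatedStatement statement out) := by unfold Spec_getUpdatedStatement; infer_instance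

-- ===== CLAIM (what is proved, stated in full; the proofs are below) =====
def Claim_equal_getUpdatedStatement : Prop := ∀ (statement : String), Dom_getUpdatedStatement statement → Spec_getUpdatedStatement statement (getUpdatedStatement statement)

-- ===== LEMMAS AND PROOFS =====

-- chars of lowerChar's range are never uppercase, so lowerChar is idempotent
lemma pv_isupper_iff (c : Char) : PySem.Chars.isupper c = true ↔ 65 ≤ c.toNat ∧ c.toNat ≤ 90 := by
  rw [PySem.Chars.isupper]
  rw [Bool.and_eq_true, decide_eq_true_iff, decide_eq_true_iff, Char.le_def, Char.le_def,
      UInt32.le_iff_toNat_le, UInt32.le_iff_toNat_le]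
  constructor
  · rintro ⟨h1, h2⟩; exact ⟨h1, h2⟩
  · rintro ⟨h1, h2⟩; exact ⟨h1, h2⟩

lemma pv_lowerChar_idem (c : Char) : PySem.Chars.lowerChar (PySem.Chars.lowerChar c) = PySem.Chars.lowerChar c := by
  unfold PySem.Chars.lowerChar
  by_cases h : PySem.Chars.isupper c = true
  · simp only [h, if_true]
    have hval : (c.toNat + 32).isValidChar := by
      rw [pv_isupper_iff] at h
      left; omega
    have hv : (Char.ofNat (c.toNat + 32)).toNat = c.toNat + 32 := by
      rw [Char.toNat_ofNat, if_pos hval]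
    have hnu : ¬ PySem.Chars.isupper (Char.ofNat (c.toNat + 32)) = true := by
      rw [pv_isupper_iff, hv]
      rw [pv_isupper_iff] at h
      omega
    simp only [hnu]
    simp
  · simp only [h]
    simp [h]

-- every char of a word produced by splitOn comes from the split string
lemma pv_go_chars : ∀ (fuel : Nat) (sep l cur : List Char) (acc : List (List Char)),
    ∀ w ∈ PySem.Chars.splitOn.go sep fuel l cur acc, ∀ c ∈ w,
      c ∈ l ∨ c ∈ cur ∨ ∃ w' ∈ acc, c ∈ w' := by
  intro fuel
  induction fuel with
  | zero =>
    intro sep l cur acc w hw c hc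
    rw [PySem.Chars.splitOn.go.eq_def] at hw
    simp at hw
    rcases hw with hw | hw
    · exact Or.inr (Or.inr ⟨w, hw, hc⟩)
    · subst hw; simp at hc; tauto
  | succ fuel ih =>
    intro sep l cur acc w hw c hc
    cases l with
    | nil =>
      rw [PySem.Chars.splitOn.go.eq_def] at hw
      simp at hw
      rcases hw with hw | hw
      · exact Or.inr (Or.inr ⟨w, hw, hc⟩)
      · subst hw; simp at hc; tauto
    | cons x rest =>
      rw [PySem.Chars.splitOn.go.eq_def] at hw
      simp only at hw
      split at hw
      · have := ih sep (List.drop sep.length (x :: rest)) [] (cur.reverse :: acc) w hw c hc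
        rcases this with h | h | ⟨w', hw', hc'⟩
        · exact Or.inl (List.mem_of_mem_drop h)
        · simp at h
        · simp at hw'
          rcases hw' with hw' | hw'
          · subst hw'; simp at hc'; tauto
          · exact Or.inr (Or.inr ⟨w', hw', hc'⟩)
      · have := ih sep rest (x :: cur) acc w hw c hc
        rcases this with h | h | h
        · exact Or.inl (List.mem_cons_of_mem _ h)
        · simp at h
          rcases h with h | h
          · subst h; exact Or.inl (List.mem_cons_self)
          · tauto
        · tauto

lemma pv_splitOn_chars (s sep w : List Char) (hw : w ∈ PySem.Chars.splitOn s sep)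
    (c : Char) (hc : c ∈ w) : c ∈ s := by
  have := pv_go_chars (s.length + 1) sep s [] [] w hw c hc
  simpa using this

-- every word of statement.lower().split(" ") is fixed by .lower()
lemma pv_words_lower (statement : String) :
    ∀ w ∈ (PySem.Str.split? (PySem.Str.lower statement) " ").getD [], PySem.Str.lower w = w := by
  intro w hw
  have hsplit : (PySem.Str.split? (PySem.Str.lower statement) " ").getD []
      = (PySem.Chars.splitOn (PySem.Str.lower statement).toList [' ']).map String.ofList := by
    have h := PySem.Str.split?_map (PySem.Str.lower statement) " "
    rw [PySem.Chars.split?] at h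
    rw [show (" ".toList) = [' '] from rfl] at h
    simp only [List.isEmpty_cons, Bool.false_eq_true, if_false] at h
    cases hs : PySem.Str.split? (PySem.Str.lower statement) " " with
    | none => rw [hs] at h; simp at h
    | some l =>
      rw [hs] at h
      simp only [Option.map_some, Option.some.injEq] at h
      simp only [Option.getD_some]
      rw [← h, List.map_map]
      rw [show (String.ofList ∘ String.toList) = id from funext (fun s => by simp)]
      simp
  rw [hsplit] at hw
  rcases List.mem_map.mp hw with ⟨cs, hcs, rfl⟩
  have hfix : ∀ c ∈ cs, PySem.Chars.lowerChar c = c := by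
    intro c hc
    have hmem : c ∈ (PySem.Str.lower statement).toList := pv_splitOn_chars _ _ _ hcs c hc
    rw [PySem.Str.lower] at hmem
    simp only [String.toList_ofList] at hmem
    rcases List.mem_map.mp hmem with ⟨c', _, rfl⟩
    exact pv_lowerChar_idem c'
  rw [PySem.Str.lower]
  have : PySem.Chars.lower (String.ofList cs).toList = cs := by
    simp only [String.toList_ofList, PySem.Chars.lower]
    exact List.map_congr_left hfix |>.trans (List.map_id cs)
  rw [this]

-- index lists built by A's first loop, in structural form
def pvIdxsOf (p : String → Bool) : List String → List Int
  | [] => []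
  | w :: ws => (if p w then [(0 : Int)] else []) ++ (pvIdxsOf p ws).map (· + 1)

lemma pv_idxsOf_nonneg (p : String → Bool) : ∀ ws, ∀ x ∈ pvIdxsOf p ws, 0 ≤ x := by
  intro ws
  induction ws with
  | nil => simp [pvIdxsOf]
  | cons w ws ih =>
    intro x hx
    simp only [pvIdxsOf, List.mem_append, List.mem_map] at hx
    rcases hx with hx | ⟨y, hy, rfl⟩
    · split at hx <;> simp at hx; omega
    · have := ih y hy; omega

lemma pv_map_shift (l : List Int) (k : Int) : (l.map (· + 1)).map (· + k) = l.map (· + (k + 1)) := by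
  simp only [List.map_map]
  apply List.map_congr_left
  intro x _
  simp only [Function.comp_apply]
  omega

lemma pv_fold_char : ∀ (ws : List String) (iL yL : List Int) (k : Int),
    ws.foldl (fun (acc : List Int × List Int × Int) s =>
      if PySem.Str.lower s == "i" then (acc.1 ++ [acc.2.2], acc.2.1, acc.2.2 + 1)
      else if PySem.Str.lower s == "you" then (acc.1, acc.2.1 ++ [acc.2.2], acc.2.2 + 1)
      else (acc.1, acc.2.1, acc.2.2 + 1)) (iL, yL, k)
    = (iL ++ (pvIdxsOf (fun s => PySem.Str.lower s == "i") ws).map (· + k),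
       yL ++ (pvIdxsOf (fun s => PySem.Str.lower s == "you") ws).map (· + k),
       k + ws.length) := by
  intro ws
  induction ws with
  | nil => intro iL yL k; simp [pvIdxsOf]
  | cons w ws ih =>
    intro iL yL k
    simp only [List.foldl_cons, pvIdxsOf]
    by_cases hi : (PySem.Str.lower w == "i") = true
    · have hy : ¬ (PySem.Str.lower w == "you") = true := by
        simp only [beq_iff_eq] at hi ⊢; rw [hi]; simp
      simp only [hi, hy, if_true, ih, List.map_append, List.map_cons, List.map_nil,
        pv_map_shift, List.length_cons]
      refine Prod.ext ?_ (Prod.ext ?_ ?_)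
      · simp
      · simp
      · simp only []
        push_cast
        ring
    · by_cases hy : (PySem.Str.lower w == "you") = true
      · simp only [hi, hy, if_true, ih, List.map_append, List.map_cons, List.map_nil,
          pv_map_shift, List.length_cons]
        refine Prod.ext ?_ (Prod.ext ?_ ?_)
        · simp
        · simp
        · simp only []
          push_cast
          ring
      · simp only [hi, hy, ih, List.map_append,
          pv_map_shift, List.length_cons]
        refine Prod.ext ?_ (Prod.ext ?_ ?_)
        · simp
        · simp
        · simp only []
          push_cast
          ring

def pvSetFold (v : String) (idxs : List Int) (l : List String) : List String :=
  idxs.foldl (fun l x => PySem.List.pySetD l x v) l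

lemma pv_setFold_shift (v : String) : ∀ (idxs : List Int), (∀ x ∈ idxs, 0 ≤ x) →
    ∀ (w : String) (l : List String),
      pvSetFold v (idxs.map (· + 1)) (w :: l) = w :: pvSetFold v idxs l := by
  intro idxs
  induction idxs with
  | nil => intro _ w l; rfl
  | cons x xs ih =>
    intro h w l
    have hx : 0 ≤ x := h x (by simp)
    simp only [List.map_cons, pvSetFold, List.foldl_cons]
    have h1 : PySem.List.pySetD (w :: l) (x + 1) v = w :: PySem.List.pySetD l x v := by
      rw [PySem.List.pySetD_of_nonneg _ _ (by omega), PySem.List.pySetD_of_nonneg _ _ hx]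
      have : (x + 1).toNat = x.toNat + 1 := by omega
      rw [this]
      rfl
    rw [h1]
    exact ih (fun y hy => h y (by simp [hy])) w (PySem.List.pySetD l x v)

lemma pv_setFold_append (v : String) (a b : List Int) (l : List String) :
    pvSetFold v (a ++ b) l = pvSetFold v b (pvSetFold v a l) := by
  simp [pvSetFold, List.foldl_append]

-- the heart: A's two replacement passes equal B's single map, on lowercase-fixed words
lemma pv_core (ws : List String) (h : ∀ w ∈ ws, PySem.Str.lower w = w) :
    pvSetFold "i" (pvIdxsOf (fun s => PySem.Str.lower s == "you") ws)
      (pvSetFold "you" (pvIdxsOf (fun s => PySem.Str.lower s == "i") ws) ws)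
    = ws.map pvSwapWord := by
  induction ws with
  | nil => rfl
  | cons w ws ih =>
    have hw : PySem.Str.lower w = w := h w (by simp)
    have hws : ∀ w' ∈ ws, PySem.Str.lower w' = w' := fun w' hw' => h w' (by simp [hw'])
    have ihs := ih hws
    have hnni := pv_idxsOf_nonneg (fun s => PySem.Str.lower s == "i") ws
    have hnny := pv_idxsOf_nonneg (fun s => PySem.Str.lower s == "you") ws
    simp only [pvIdxsOf, hw]
    by_cases hi : (w == "i") = true
    · have hyw : ¬ (w == "you") = true := by
        simp only [beq_iff_eq] at hi ⊢; rw [hi]; simp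
      rw [if_pos hi, if_neg hyw]
      simp only [List.nil_append]
      rw [pv_setFold_append]
      have hset : pvSetFold "you" [(0 : Int)] (w :: ws) = "you" :: ws := by
        simp [pvSetFold, PySem.List.pySetD_of_nonneg _ _ (by omega : (0:Int) ≤ 0)]
      rw [hset, pv_setFold_shift _ _ hnni, pv_setFold_shift _ _ hnny, ihs]
      simp only [List.map_cons, pvSwapWord]
      rw [if_pos hi]
    · by_cases hy : (w == "you") = true
      · rw [if_neg hi, if_pos hy]
        simp only [List.nil_append]
        rw [pv_setFold_shift _ _ hnni, pv_setFold_append]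
        have hset : pvSetFold "i" [(0 : Int)] (w :: pvSetFold "you" (pvIdxsOf (fun s => PySem.Str.lower s == "i") ws) ws)
            = "i" :: pvSetFold "you" (pvIdxsOf (fun s => PySem.Str.lower s == "i") ws) ws := by
          simp [pvSetFold, PySem.List.pySetD_of_nonneg _ _ (by omega : (0:Int) ≤ 0)]
        rw [hset, pv_setFold_shift _ _ hnny, ihs]
        simp only [List.map_cons, pvSwapWord]
        rw [if_neg hi, if_pos hy]
      · rw [if_neg hi, if_neg hy]
        simp only [List.nil_append]
        rw [pv_setFold_shift _ _ hnni, pv_setFold_shift _ _ hnny, ihs]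
        simp only [List.map_cons, pvSwapWord]
        rw [if_neg hi, if_neg hy]

lemma pv_map_add_zero (l : List Int) : l.map (· + 0) = l := by
  simp

-- A's pipeline on the word list equals B's single map
lemma pv_list (ws : List String) (h : ∀ w ∈ ws, PySem.Str.lower w = w) :
    (ws.foldl (fun (acc : List Int × List Int × Int) s =>
        if PySem.Str.lower s == "i" then (acc.1 ++ [acc.2.2], acc.2.1, acc.2.2 + 1)
        else if PySem.Str.lower s == "you" then (acc.1, acc.2.1 ++ [acc.2.2], acc.2.2 + 1)
        else (acc.1, acc.2.1, acc.2.2 + 1)) ([], [], 0)).2.1.foldl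
      (fun l x => PySem.List.pySetD l x "i")
      ((ws.foldl (fun (acc : List Int × List Int × Int) s =>
          if PySem.Str.lower s == "i" then (acc.1 ++ [acc.2.2], acc.2.1, acc.2.2 + 1)
          else if PySem.Str.lower s == "you" then (acc.1, acc.2.1 ++ [acc.2.2], acc.2.2 + 1)
          else (acc.1, acc.2.1, acc.2.2 + 1)) ([], [], 0)).1.foldl
        (fun l x => PySem.List.pySetD l x "you") ws)
    = ws.map pvSwapWord := by
  rw [pv_fold_char]
  simp only [List.nil_append, pv_map_add_zero]
  exact pv_core ws h

lemma pv_swap_lower (w : String) (h : PySem.Str.lower w = w) :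
    PySem.Str.lower (pvSwapWord w) = pvSwapWord w := by
  unfold pvSwapWord
  split_ifs with h1 h2
  · decide
  · decide
  · exact h

-- ===== VERDICT (by name: the statement is the Claim_ definition above) =====
lemma pv_whole (ws : List String) (hwords : ∀ w ∈ ws, PySem.Str.lower w = w) :
    (if PySem.Str.lower (PySem.List.pyGetD
          ((ws.foldl (fun (acc : List Int × List Int × Int) s =>
              if PySem.Str.lower s == "i" then (acc.1 ++ [acc.2.2], acc.2.1, acc.2.2 + 1)
              else if PySem.Str.lower s == "you" then (acc.1, acc.2.1 ++ [acc.2.2], acc.2.2 + 1)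
              else (acc.1, acc.2.1, acc.2.2 + 1)) ([], [], 0)).2.1.foldl
            (fun l x => PySem.List.pySetD l x "i")
            ((ws.foldl (fun (acc : List Int × List Int × Int) s =>
                if PySem.Str.lower s == "i" then (acc.1 ++ [acc.2.2], acc.2.1, acc.2.2 + 1)
                else if PySem.Str.lower s == "you" then (acc.1, acc.2.1 ++ [acc.2.2], acc.2.2 + 1)
                else (acc.1, acc.2.1, acc.2.2 + 1)) ([], [], 0)).1.foldl
              (fun l x => PySem.List.pySetD l x "you") ws)) 0 "") == "i" then
        "you know " ++ PySem.Str.join " " ((ws.foldl (fun (acc : List Int × List Int × Int) s =>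
              if PySem.Str.lower s == "i" then (acc.1 ++ [acc.2.2], acc.2.1, acc.2.2 + 1)
              else if PySem.Str.lower s == "you" then (acc.1, acc.2.1 ++ [acc.2.2], acc.2.2 + 1)
              else (acc.1, acc.2.1, acc.2.2 + 1)) ([], [], 0)).2.1.foldl
            (fun l x => PySem.List.pySetD l x "i")
            ((ws.foldl (fun (acc : List Int × List Int × Int) s =>
                if PySem.Str.lower s == "i" then (acc.1 ++ [acc.2.2], acc.2.1, acc.2.2 + 1)
                else if PySem.Str.lower s == "you" then (acc.1, acc.2.1 ++ [acc.2.2], acc.2.2 + 1)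
                else (acc.1, acc.2.1, acc.2.2 + 1)) ([], [], 0)).1.foldl
              (fun l x => PySem.List.pySetD l x "you") ws))
      else
        "i know " ++ PySem.Str.join " " ((ws.foldl (fun (acc : List Int × List Int × Int) s =>
              if PySem.Str.lower s == "i" then (acc.1 ++ [acc.2.2], acc.2.1, acc.2.2 + 1)
              else if PySem.Str.lower s == "you" then (acc.1, acc.2.1 ++ [acc.2.2], acc.2.2 + 1)
              else (acc.1, acc.2.1, acc.2.2 + 1)) ([], [], 0)).2.1.foldl
            (fun l x => PySem.List.pySetD l x "i")
            ((ws.foldl (fun (acc : List Int × List Int × Int) s =>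
                if PySem.Str.lower s == "i" then (acc.1 ++ [acc.2.2], acc.2.1, acc.2.2 + 1)
                else if PySem.Str.lower s == "you" then (acc.1, acc.2.1 ++ [acc.2.2], acc.2.2 + 1)
                else (acc.1, acc.2.1, acc.2.2 + 1)) ([], [], 0)).1.foldl
              (fun l x => PySem.List.pySetD l x "you") ws)))
    = (if PySem.List.pyGetD (ws.map pvSwapWord) 0 "" == "i" then "you know " else "i know ")
        ++ PySem.Str.join " " (ws.map pvSwapWord) := by
  rw [pv_list ws hwords]
  cases ws with
  | nil => decide
  | cons w t =>
    have hw : PySem.Str.lower w = w := hwords w (by simp)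
    rw [List.map_cons, PySem.List.pyGetD_zero_cons,
        pv_swap_lower w hw]
    by_cases hc : (pvSwapWord w == "i") = true
    · rw [if_pos hc, if_pos hc]
    · rw [if_neg hc, if_neg hc]

-- ===== VERDICT (by name: the statement is the Claim_ definition above) =====
theorem getUpdatedStatement_spec : Claim_equal_getUpdatedStatement := by
  intro statement _
  unfold Spec_getUpdatedStatement getUpdatedStatement getUpdatedStatement_alt
  exact pv_whole ((PySem.Str.split? (PySem.Str.lower statement) " ").getD [])
    (pv_words_lower statement)
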